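-- pv_equiv track=rewrite | github.com/Elcherneske/DIA-CLIP | scripts/XIC/DIANNInfoReader.py | parse_peptide_id
-- ===== SOURCE A (Python) =====
-- def parse_peptide_id(peptide_id: str) -> tuple:
--     """解析肽段ID，提取序列和电荷"""
--     # 假设格式为 "序列+电荷"，如 "AAAAAAAAAAAAAAAGAGAGAK3"
--     charge_str = ''
--     for char in peptide_id[::-1]:
--         if char.isdigit():
--             charge_str += char
--         else:
--             break
--     charge = int(charge_str[::-1])
--     sequence = peptide_id[:-len(charge_str)]
--     return sequence, charge
-- ===== SOURCE B (Python) =====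
-- def parse_peptide_id(peptide_id: str) -> tuple:
--     """解析肽段ID，提取序列和电荷"""
--     i = len(peptide_id)
--     while i > 0 and peptide_id[i - 1].isdigit():
--         i -= 1
--     return peptide_id[:i], int(peptide_id[i:])
-- ===== Notes on version B (the rewrite author's own statement) =====
-- stated objective: simpler
-- what changed: Replaces the reverse-iteration loop that accumulates a charge string character by character, reverses it twice and slices with a negative length by a plain backwards index scan that finds the split point, followed by two ordinary slices; no intermediate string is built.
import Mathlib
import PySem

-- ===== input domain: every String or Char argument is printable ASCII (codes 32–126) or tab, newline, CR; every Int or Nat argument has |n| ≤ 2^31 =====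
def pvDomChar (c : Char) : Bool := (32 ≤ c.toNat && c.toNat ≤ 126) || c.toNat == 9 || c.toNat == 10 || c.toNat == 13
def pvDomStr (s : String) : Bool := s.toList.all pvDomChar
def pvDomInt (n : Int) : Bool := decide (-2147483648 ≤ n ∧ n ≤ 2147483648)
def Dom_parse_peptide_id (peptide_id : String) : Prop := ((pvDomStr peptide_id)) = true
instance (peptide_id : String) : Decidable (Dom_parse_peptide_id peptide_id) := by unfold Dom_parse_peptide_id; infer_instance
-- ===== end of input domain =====

-- B replaces A's reverse-iteration loop (build charge_str, reverse it, negative slice) with a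
-- single backwards index scan and two nonnegative slices; simpler, same cost.

-- ===== PORT A =====
-- the 'for char in peptide_id[::-1]: … break' loop: acc is charge_str
def pvChargeLoop : List Char → List Char → List Char
  | acc, [] => acc
  | acc, c :: rest => if PySem.Str.isdigit c then pvChargeLoop (acc ++ [c]) rest else acc

def parse_peptide_id (peptide_id : String) : String × Int :=
  let cs := peptide_id.toList
  let charge_str := pvChargeLoop [] cs.reverse
  -- int(charge_str[::-1]); Pre_ excludes the ValueError case (no trailing digit)
  let charge := (PySem.Int.ofChars? charge_str.reverse).getD 0
  -- peptide_id[:-len(charge_str)]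
  let sequence := PySem.List.slice cs none (some (-(charge_str.length : Int)))
  (String.ofList sequence, charge)

-- ===== PORT B =====
-- the 'while i > 0 and peptide_id[i-1].isdigit(): i -= 1' loop, recursing on i
def pvSplitLoop (cs : List Char) : Nat → Nat
  | 0 => 0
  | i + 1 => if PySem.Str.isdigit (cs.getD i ' ') then pvSplitLoop cs i else i + 1

def parse_peptide_id_alt (peptide_id : String) : String × Int :=
  let cs := peptide_id.toList
  let i := pvSplitLoop cs cs.length
  -- peptide_id[:i] and peptide_id[i:] with 0 ≤ i ≤ len(peptide_id): exactly take/drop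
  -- int(peptide_id[i:]); Pre_ excludes the ValueError case (empty digit suffix)
  (String.ofList (cs.take i), (PySem.Int.ofChars? (cs.drop i)).getD 0)

-- ===== PRECONDITION & SPEC =====
-- Pre_: the id ends with a digit character; otherwise A raises ValueError converting the empty
-- digit suffix to an integer — and B raises the same ValueError there.
def Pre_parse_peptide_id (peptide_id : String) : Prop :=
  peptide_id.toList ≠ [] ∧ PySem.Str.isdigit peptide_id.toList.reverse.headI = true
instance (peptide_id : String) : Decidable (Pre_parse_peptide_id peptide_id) := by
  unfold Pre_parse_peptide_id; infer_instance

def pvWitness_parse_peptide_id : String := "AK3"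

def Spec_parse_peptide_id (peptide_id : String) (out : String × Int) : Prop := out = parse_peptide_id_alt peptide_id
instance (peptide_id : String) (out : String × Int) : Decidable (Spec_parse_peptide_id peptide_id out) := by unfold Spec_parse_peptide_id; infer_instance

-- ===== CLAIM (what is proved, stated in full; the proofs are below) =====
def Claim_equal_parse_peptide_id : Prop := ∀ (peptide_id : String), Dom_parse_peptide_id peptide_id → Pre_parse_peptide_id peptide_id → Spec_parse_peptide_id peptide_id (parse_peptide_id peptide_id)

-- ===== LEMMAS AND PROOFS =====

-- A's loop builds exactly the digit prefix of the reversed list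
theorem pv_loop_eq_takeWhile (l acc : List Char) :
    pvChargeLoop acc l = acc ++ l.takeWhile PySem.Str.isdigit := by
  induction l generalizing acc with
  | nil => simp [pvChargeLoop]
  | cons c rest ih =>
    simp only [pvChargeLoop, List.takeWhile]
    by_cases h : PySem.Str.isdigit c = true
    · simp [h, ih]
    · simp [h]

-- B's loop stops exactly before the trailing digit block
theorem pv_split_eq (cs : List Char) :
    ∀ i, i ≤ cs.length →
      pvSplitLoop cs i = i - ((cs.take i).reverse.takeWhile PySem.Str.isdigit).length := by
  intro i; induction i with
  | zero => intro _; simp [pvSplitLoop]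
  | succ i ih =>
    intro h
    have hi : i < cs.length := h
    have htake : (cs.take (i + 1)).reverse = cs[i] :: (cs.take i).reverse := by
      rw [List.take_add_one]; simp [List.getElem?_eq_getElem hi]
    have hgetD : cs.getD i ' ' = cs[i] := List.getD_eq_getElem cs ' ' hi
    simp only [pvSplitLoop, hgetD, htake, List.takeWhile]
    by_cases hd : PySem.Str.isdigit cs[i] = true
    · simp only [hd, if_true, List.length_cons]
      rw [ih (Nat.le_of_lt hi), Nat.succ_sub_succ]
    · simp [hd]

-- ===== VERDICT (by name: the statement is the Claim_ definition above) =====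
theorem parse_peptide_id_spec : Claim_equal_parse_peptide_id := by
  intro s _ hpre
  obtain ⟨hne, hdig⟩ := hpre
  unfold Spec_parse_peptide_id
  set cs := s.toList with hcs
  set r := cs.reverse with hr
  set tw := r.takeWhile PySem.Str.isdigit with htw
  set dw := r.dropWhile PySem.Str.isdigit with hdw
  have hsplit : tw ++ dw = r := List.takeWhile_append_dropWhile
  -- r is nonempty and starts with a digit, so tw is nonempty
  obtain ⟨c, t, hrc⟩ : ∃ c t, r = c :: t := by
    cases hrr : r with
    | nil => exact absurd (by simpa [hr] using hrr) hne
    | cons c t => exact ⟨c, t, rfl⟩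
  have hc : PySem.Str.isdigit c = true := by
    have : r.headI = c := by rw [hrc]; rfl
    rwa [this] at hdig
  have hk : 0 < tw.length := by
    rw [htw, hrc, List.takeWhile]
    simp [hc]
  have hcsdecomp : cs = dw.reverse ++ tw.reverse := by
    have : r.reverse = (tw ++ dw).reverse := by rw [hsplit]
    simpa [hr, List.reverse_append] using this
  have hlen : cs.length = tw.length + dw.length := by
    have := congrArg List.length hsplit
    simp only [List.length_append] at this
    simp [hr] at this
    omega
  -- A's pieces
  have hseq : PySem.List.slice cs none (some (-(tw.length : Int))) = dw.reverse := by
    rw [PySem.List.slice_to_neg_natCast cs tw.length hk, hcsdecomp]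
    rw [show (dw.reverse ++ tw.reverse).length - tw.length = dw.reverse.length by simp]
    exact List.take_left
  have hA : parse_peptide_id s
      = (String.ofList dw.reverse, (PySem.Int.ofChars? tw.reverse).getD 0) := by
    simp only [parse_peptide_id, ← hcs, ← hr, pv_loop_eq_takeWhile, List.nil_append, ← htw, hseq]
  -- B's pieces
  have hi : pvSplitLoop cs cs.length = dw.length := by
    rw [pv_split_eq cs cs.length (Nat.le_refl _), List.take_length, ← hr, ← htw]
    omega
  have hdwrev : dw.reverse.length = dw.length := List.length_reverse
  have hB : parse_peptide_id_alt s
      = (String.ofList dw.reverse, (PySem.Int.ofChars? tw.reverse).getD 0) := by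
    simp only [parse_peptide_id_alt, ← hcs, hi]
    rw [hcsdecomp, List.take_left' hdwrev, List.drop_left' hdwrev]
  rw [hA, hB]
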